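-- pv_equiv track=rewrite | github.com/dskunkler/advent-of-go | 2024/day14/day14.py | calcNeighborScore
-- ===== SOURCE A (Python) =====
-- def numNeighbors(row, col, grid):
--     return 0 if not 0<= row < len(grid) or not 0 <= col < len(grid[0]) else grid[row][col]
--
-- def calcNeighborScore(grid):
--     neighbors = [(0,1), (1,1),(1,0),(1,-1),(-1, -1), (0, -1),(-1,0),  (-1,1) ]
--     sol = 0
--     for row in range(len(grid)):
--         for col in range(len(grid[0])):
--             if grid[row][col] !=0:
--                 for x,y in neighbors:
--                     sol += numNeighbors(row+x, col+y, grid)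
--     return sol
-- ===== SOURCE B (Python) =====
-- def calcNeighborScore(grid):
--     # Symmetric decomposition: each cell contributes its value once per
--     # non-zero in-bounds neighbor, instead of each non-zero cell summing
--     # its neighbors' values.
--     rows = len(grid)
--     cols = len(grid[0])
--     offsets = ((0, 1), (1, 1), (1, 0), (1, -1), (-1, -1), (0, -1), (-1, 0), (-1, 1))
--     total = 0
--     for r in range(rows):
--         for c in range(cols):
--             cnt = 0
--             for dr, dc in offsets:
--                 nr, nc = r + dr, c + dc
--                 if 0 <= nr < rows and 0 <= nc < cols and grid[nr][nc] != 0: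
--                     cnt += 1
--             total += grid[r][c] * cnt
--     return total
-- ===== Notes on version B (the rewrite author's own statement) =====
-- stated objective: alternative
-- what changed: B reverses the roles of center and neighbor: instead of each non-zero cell summing its neighbors' values, B counts for every cell how many of its 8 in-bounds neighbors are non-zero and adds the cell's value times that count, correct by symmetry of the offset set.
-- outside the precondition, e.g. on calcNeighborScore([]): A returns 0, B raises IndexError
import Mathlib
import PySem

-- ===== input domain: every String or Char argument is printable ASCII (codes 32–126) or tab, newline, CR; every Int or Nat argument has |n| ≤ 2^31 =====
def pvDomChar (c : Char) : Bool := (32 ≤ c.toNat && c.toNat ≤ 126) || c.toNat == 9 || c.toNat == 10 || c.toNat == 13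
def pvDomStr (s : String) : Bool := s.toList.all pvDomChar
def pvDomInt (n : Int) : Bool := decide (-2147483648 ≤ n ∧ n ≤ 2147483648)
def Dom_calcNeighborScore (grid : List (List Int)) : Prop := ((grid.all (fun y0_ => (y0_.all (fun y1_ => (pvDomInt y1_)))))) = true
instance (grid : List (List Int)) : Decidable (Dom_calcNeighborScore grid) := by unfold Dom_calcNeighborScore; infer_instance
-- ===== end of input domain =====

-- B reverses the roles of center and neighbor cell: it counts, for every cell, its
-- non-zero in-bounds neighbors and adds the cell's value times that count (alternative
-- decomposition, correct by symmetry of the offset set; same asymptotic cost).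

-- ===== PORT A =====
def numNeighbors (row col : Int) (grid : List (List Int)) : Int :=
  if ¬(0 ≤ row ∧ row < (grid.length : Int)) ∨
     ¬(0 ≤ col ∧ col < ((PySem.List.pyGetD grid 0 []).length : Int)) then 0
  else PySem.List.pyGetD (PySem.List.pyGetD grid row []) col 0

def calcNeighborScore (grid : List (List Int)) : Int :=
  let neighbors : List (Int × Int) :=
    [(0,1),(1,1),(1,0),(1,-1),(-1,-1),(0,-1),(-1,0),(-1,1)]
  (PySem.List.pyRange 0 (grid.length : Int) 1).foldl (fun sol row =>
    (PySem.List.pyRange 0 ((PySem.List.pyGetD grid 0 []).length : Int) 1).foldl (fun sol col =>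
      if PySem.List.pyGetD (PySem.List.pyGetD grid row []) col 0 ≠ 0 then
        neighbors.foldl (fun sol d => sol + numNeighbors (row + d.1) (col + d.2) grid) sol
      else sol) sol) 0

-- ===== PORT B =====
def calcNeighborScore_alt (grid : List (List Int)) : Int :=
  let rows : Int := grid.length
  let cols : Int := (PySem.List.pyGetD grid 0 []).length
  let offsets : List (Int × Int) :=
    [(0,1),(1,1),(1,0),(1,-1),(-1,-1),(0,-1),(-1,0),(-1,1)]
  (PySem.List.pyRange 0 rows 1).foldl (fun total r =>
    (PySem.List.pyRange 0 cols 1).foldl (fun total c =>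
      let cnt : Int := offsets.foldl (fun cnt d =>
        if 0 ≤ r + d.1 ∧ r + d.1 < rows ∧ 0 ≤ c + d.2 ∧ c + d.2 < cols ∧
           PySem.List.pyGetD (PySem.List.pyGetD grid (r + d.1) []) (c + d.2) 0 ≠ 0
        then cnt + 1 else cnt) 0
      total + PySem.List.pyGetD (PySem.List.pyGetD grid r []) c 0 * cnt) total) 0

-- ===== PRECONDITION & SPEC =====
-- Pre_ excludes ragged grids having a row shorter than the first row, where A raises
-- IndexError (grid[row][col] for some col < len(grid[0])), and the empty grid, where A
-- happens to return 0 without ever reading len(grid[0]) while B (which computes the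
-- column bound up front, as A does on every non-empty grid) raises IndexError.
def Pre_calcNeighborScore (grid : List (List Int)) : Prop :=
  grid ≠ [] ∧ ∀ row ∈ grid, grid.headI.length ≤ row.length
instance (grid : List (List Int)) : Decidable (Pre_calcNeighborScore grid) := by
  unfold Pre_calcNeighborScore; infer_instance
def pvWitness_calcNeighborScore : List (List Int) := [[1, 0], [0, 2]]

def Spec_calcNeighborScore (grid : List (List Int)) (out : Int) : Prop := out = calcNeighborScore_alt grid
instance (grid : List (List Int)) (out : Int) : Decidable (Spec_calcNeighborScore grid out) := by unfold Spec_calcNeighborScore; infer_instance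

-- ===== CLAIM (what is proved, stated in full; the proofs are below) =====
def Claim_equal_calcNeighborScore : Prop := ∀ (grid : List (List Int)), Dom_calcNeighborScore grid → Pre_calcNeighborScore grid → Spec_calcNeighborScore grid (calcNeighborScore grid)

-- ===== LEMMAS AND PROOFS =====

-- value of the grid at an Int coordinate pair, 0 outside the rows × (first-row width) rectangle
def pvV (grid : List (List Int)) (p : Int × Int) : Int :=
  if 0 ≤ p.1 ∧ p.1 < (grid.length : Int) ∧ 0 ≤ p.2 ∧ p.2 < (grid.headI.length : Int)
  then (grid.getD p.1.toNat []).getD p.2.toNat 0 else 0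

def pvDset : Finset (Int × Int) :=
  ([(0,1),(1,1),(1,0),(1,-1),(-1,-1),(0,-1),(-1,0),(-1,1)] : List (Int × Int)).toFinset

def pvRn (n : Nat) : Finset Int := ((List.range n).map Int.ofNat).toFinset

def pvS (grid : List (List Int)) : Finset (Int × Int) :=
  pvRn grid.length ×ˢ pvRn grid.headI.length

def pvImg (p : Int × Int) : Finset (Int × Int) := pvDset.image (fun d => (p.1 + d.1, p.2 + d.2))

lemma pv_foldl_shift {α : Type} (f : Int → α → Int) (g : α → Int)
    (h : ∀ s x, f s x = s + g x) : ∀ (l : List α) (s : Int), l.foldl f s = s + (l.map g).sum := by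
  intro l
  induction l with
  | nil => simp
  | cons x xs ih => intro s; simp [List.foldl_cons, h, ih, add_assoc]

lemma pv_nodup_range_cast (n : Nat) : ((List.range n).map Int.ofNat).Nodup := by
  apply List.Nodup.map _ List.nodup_range
  intro a b h
  exact Int.ofNat.inj h

lemma pv_mem_pvRn {n : Nat} {x : Int} : x ∈ pvRn n ↔ 0 ≤ x ∧ x < (n : Int) := by
  simp only [pvRn, List.mem_toFinset, List.mem_map, List.mem_range]
  constructor
  · rintro ⟨a, ha, rfl⟩
    simp only [Int.ofNat_eq_natCast]
    omega
  · intro h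
    refine ⟨x.toNat, by omega, ?_⟩
    simp only [Int.ofNat_eq_natCast]
    omega

lemma pv_sum_map_pyRange (n : Nat) (f : Int → Int) :
    ((PySem.List.pyRange 0 (n : Int) 1).map f).sum = ∑ i ∈ pvRn n, f i := by
  have hl : PySem.List.pyRange 0 (n : Int) 1 = (List.range n).map Int.ofNat := by
    rw [PySem.List.pyRange_one]
    have h0 : ((n : Int) - 0).toNat = n := by omega
    rw [h0]
    refine List.map_congr_left (fun a _ => ?_)
    simp only [Int.ofNat_eq_natCast]
    omega
  rw [hl, pvRn, List.sum_toFinset _ (pv_nodup_range_cast n)]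

lemma pv_mem_pvS {grid : List (List Int)} {p : Int × Int} :
    p ∈ pvS grid ↔ 0 ≤ p.1 ∧ p.1 < (grid.length : Int) ∧ 0 ≤ p.2 ∧ p.2 < (grid.headI.length : Int) := by
  obtain ⟨a, b⟩ := p
  simp [pvS, Finset.mem_product, pv_mem_pvRn]; tauto

lemma pvV_zero_of_not_mem {grid : List (List Int)} {p : Int × Int} (h : p ∉ pvS grid) :
    pvV grid p = 0 := by
  rw [pv_mem_pvS] at h; simp only [pvV]; rw [if_neg]; tauto

lemma pv_sum_restrict {grid : List (List Int)} (T : Finset (Int × Int)) (g : Int × Int → Int)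
    (hg : ∀ q, q ∉ pvS grid → g q = 0) :
    ∑ q ∈ T, g q = ∑ q ∈ pvS grid, if q ∈ T then g q else 0 := by
  rw [← Finset.sum_filter]
  have h1 : ∑ q ∈ T, g q = ∑ q ∈ T.filter (· ∈ pvS grid), g q := by
    refine (Finset.sum_filter_of_ne ?_).symm
    intro q hq hne
    by_contra hns
    exact hne (hg q hns)
  rw [h1]
  apply Finset.sum_congr _ (fun _ _ => rfl)
  ext q
  simp [Finset.mem_filter, and_comm]

lemma pv_mem_pvImg {p q : Int × Int} : q ∈ pvImg p ↔ (q.1 - p.1, q.2 - p.2) ∈ pvDset := by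
  obtain ⟨p1, p2⟩ := p; obtain ⟨q1, q2⟩ := q
  simp only [pvImg, Finset.mem_image]
  constructor
  · rintro ⟨⟨a, b⟩, hd, he⟩
    simp only [Prod.mk.injEq] at he ⊢
    obtain ⟨h1, h2⟩ := he
    have ha : q1 - p1 = a := by omega
    have hb : q2 - p2 = b := by omega
    rw [ha, hb]; exact hd
  · intro h
    refine ⟨(q1 - p1, q2 - p2), h, ?_⟩
    simp only [Prod.mk.injEq]
    omega

lemma pv_neg_mem_pvDset {x y : Int} : (x, y) ∈ pvDset ↔ (-x, -y) ∈ pvDset := by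
  simp [pvDset, Prod.ext_iff]; omega

lemma pv_pvImg_symm {p q : Int × Int} : q ∈ pvImg p ↔ p ∈ pvImg q := by
  rw [pv_mem_pvImg, pv_mem_pvImg]
  have h1 : p.1 - q.1 = -(q.1 - p.1) := by ring
  have h2 : p.2 - q.2 = -(q.2 - p.2) := by ring
  rw [h1, h2, ← pv_neg_mem_pvDset]

lemma pv_sum_pvImg (p : Int × Int) (h : Int × Int → Int) :
    ∑ d ∈ pvDset, h (p.1 + d.1, p.2 + d.2) = ∑ q ∈ pvImg p, h q := by
  rw [pvImg, Finset.sum_image]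
  intro d1 _ d2 _ he
  obtain ⟨a1, b1⟩ := d1; obtain ⟨a2, b2⟩ := d2
  simp only [Prod.mk.injEq] at he ⊢
  omega

lemma pv_len0 {grid : List (List Int)} (hne : grid ≠ []) :
    PySem.List.pyGetD grid 0 ([] : List Int) = grid.headI := by
  cases grid with
  | nil => exact absurd rfl hne
  | cons a l => rw [PySem.List.pyGetD_zero_cons]; rfl

lemma pv_read {grid : List (List Int)} (hP : ∀ row ∈ grid, grid.headI.length ≤ row.length)
    {row col : Int} (h1 : 0 ≤ row) (h2 : row < (grid.length : Int))
    (h3 : 0 ≤ col) (h4 : col < (grid.headI.length : Int)) :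
    PySem.List.pyGetD (PySem.List.pyGetD grid row ([] : List Int)) col 0 = pvV grid (row, col) := by
  simp only [pvV]
  rw [if_pos ⟨h1, h2, h3, h4⟩]
  have hrn : row.toNat < grid.length := by omega
  rw [PySem.List.pyGetD_eq_getElem grid ([] : List Int) h1 (by exact_mod_cast h2)]
  have hmem : grid[row.toNat] ∈ grid := List.getElem_mem hrn
  have hw : grid.headI.length ≤ grid[row.toNat].length := hP _ hmem
  have hcn : col.toNat < grid[row.toNat].length := by omega
  rw [PySem.List.pyGetD_eq_getElem grid[row.toNat] 0 h3 (by omega)]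
  rw [List.getD_eq_getElem grid ([] : List Int) hrn, List.getD_eq_getElem _ 0 hcn]

lemma pv_numNeighbors {grid : List (List Int)} (hne : grid ≠ [])
    (hP : ∀ row ∈ grid, grid.headI.length ≤ row.length) (row col : Int) :
    numNeighbors row col grid = pvV grid (row, col) := by
  simp only [numNeighbors]
  rw [pv_len0 hne]
  by_cases hb : 0 ≤ row ∧ row < (grid.length : Int) ∧ 0 ≤ col ∧ col < (grid.headI.length : Int)
  · rw [if_neg (by tauto)]
    exact pv_read hP hb.1 hb.2.1 hb.2.2.1 hb.2.2.2
  · rw [if_pos (by tauto)]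
    simp only [pvV]
    rw [if_neg hb]

-- per-cell contribution of port A, as a function of the two loop indices
def pvGA (grid : List (List Int)) (row col : Int) : Int :=
  if PySem.List.pyGetD (PySem.List.pyGetD grid row ([] : List Int)) col 0 ≠ 0 then
    (([(0,1),(1,1),(1,0),(1,-1),(-1,-1),(0,-1),(-1,0),(-1,1)] : List (Int × Int)).map
      (fun d => numNeighbors (row + d.1) (col + d.2) grid)).sum
  else 0

-- per-cell contribution of port B
def pvGB (grid : List (List Int)) (r c : Int) : Int :=
  PySem.List.pyGetD (PySem.List.pyGetD grid r ([] : List Int)) c 0 *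
    (([(0,1),(1,1),(1,0),(1,-1),(-1,-1),(0,-1),(-1,0),(-1,1)] : List (Int × Int)).map
      (fun d => if 0 ≤ r + d.1 ∧ r + d.1 < (grid.length : Int) ∧ 0 ≤ c + d.2 ∧
          c + d.2 < (grid.headI.length : Int) ∧
          PySem.List.pyGetD (PySem.List.pyGetD grid (r + d.1) ([] : List Int)) (c + d.2) 0 ≠ 0
        then (1 : Int) else 0)).sum

lemma pv_A_sum {grid : List (List Int)} (hne : grid ≠ []) :
    calcNeighborScore grid =
      ∑ r ∈ pvRn grid.length, ∑ c ∈ pvRn grid.headI.length, pvGA grid r c := by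
  simp only [calcNeighborScore]
  rw [pv_len0 hne]
  rw [pv_foldl_shift _
    (fun row => ((PySem.List.pyRange 0 (grid.headI.length : Int) 1).map (pvGA grid row)).sum) ?hrow]
  case hrow =>
    intro s row
    rw [pv_foldl_shift _ (pvGA grid row) ?hcol]
    case hcol =>
      intro s col
      simp only [pvGA]
      by_cases hc : PySem.List.pyGetD (PySem.List.pyGetD grid row ([] : List Int)) col 0 ≠ 0
      · rw [if_pos hc, if_pos hc, pv_foldl_shift _
          (fun d : Int × Int => numNeighbors (row + d.1) (col + d.2) grid) (fun _ _ => rfl)]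
      · rw [if_neg hc, if_neg hc, add_zero]
  rw [zero_add, pv_sum_map_pyRange]
  exact Finset.sum_congr rfl (fun r _ => pv_sum_map_pyRange _ _)

lemma pv_B_sum {grid : List (List Int)} (hne : grid ≠ []) :
    calcNeighborScore_alt grid =
      ∑ r ∈ pvRn grid.length, ∑ c ∈ pvRn grid.headI.length, pvGB grid r c := by
  simp only [calcNeighborScore_alt]
  rw [pv_len0 hne]
  rw [pv_foldl_shift _
    (fun r => ((PySem.List.pyRange 0 (grid.headI.length : Int) 1).map (pvGB grid r)).sum) ?hrow]
  case hrow =>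
    intro s r
    rw [pv_foldl_shift _ (pvGB grid r) ?hcol]
    case hcol =>
      intro s c
      simp only [pvGB]
      rw [pv_foldl_shift _
        (fun d : Int × Int => if 0 ≤ r + d.1 ∧ r + d.1 < (grid.length : Int) ∧ 0 ≤ c + d.2 ∧
            c + d.2 < (grid.headI.length : Int) ∧
            PySem.List.pyGetD (PySem.List.pyGetD grid (r + d.1) ([] : List Int)) (c + d.2) 0 ≠ 0
          then (1 : Int) else 0) ?hcnt]
      case hcnt =>
        intro s d
        dsimp only
        by_cases h : 0 ≤ r + d.1 ∧ r + d.1 < (grid.length : Int) ∧ 0 ≤ c + d.2 ∧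
            c + d.2 < (grid.headI.length : Int) ∧
            PySem.List.pyGetD (PySem.List.pyGetD grid (r + d.1) ([] : List Int)) (c + d.2) 0 ≠ 0
        · rw [if_pos h, if_pos h]
        · rw [if_neg h, if_neg h, add_zero]
      rw [zero_add]
  rw [zero_add, pv_sum_map_pyRange]
  exact Finset.sum_congr rfl (fun r _ => pv_sum_map_pyRange _ _)

lemma pv_nodup_offsets :
    (([(0,1),(1,1),(1,0),(1,-1),(-1,-1),(0,-1),(-1,0),(-1,1)] : List (Int × Int))).Nodup := by
  decide

lemma pv_GA_eq {grid : List (List Int)} (hne : grid ≠ [])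
    (hP : ∀ row ∈ grid, grid.headI.length ≤ row.length) {p : Int × Int} (hp : p ∈ pvS grid) :
    pvGA grid p.1 p.2 =
      if pvV grid p ≠ 0 then
        ∑ q ∈ pvS grid, (if q ∈ pvImg p then pvV grid q else 0)
      else 0 := by
  rw [pv_mem_pvS] at hp
  obtain ⟨h1, h2, h3, h4⟩ := hp
  simp only [pvGA]
  rw [pv_read hP h1 h2 h3 h4]
  have hmap : (([(0,1),(1,1),(1,0),(1,-1),(-1,-1),(0,-1),(-1,0),(-1,1)] : List (Int × Int)).map
      (fun d => numNeighbors (p.1 + d.1) (p.2 + d.2) grid))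
      = (([(0,1),(1,1),(1,0),(1,-1),(-1,-1),(0,-1),(-1,0),(-1,1)] : List (Int × Int)).map
      (fun d => pvV grid (p.1 + d.1, p.2 + d.2))) :=
    List.map_congr_left (fun d _ => pv_numNeighbors hne hP _ _)
  have hbr : (([(0,1),(1,1),(1,0),(1,-1),(-1,-1),(0,-1),(-1,0),(-1,1)] : List (Int × Int)).map
      (fun d => pvV grid (p.1 + d.1, p.2 + d.2))).sum
      = ∑ q ∈ pvS grid, (if q ∈ pvImg p then pvV grid q else 0) := by
    rw [← List.sum_toFinset _ pv_nodup_offsets]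
    exact (pv_sum_pvImg p (pvV grid)).trans
      (pv_sum_restrict (pvImg p) (pvV grid) (fun q hq => pvV_zero_of_not_mem hq))
  rw [hmap, hbr]
lemma pv_GB_eq {grid : List (List Int)}
    (hP : ∀ row ∈ grid, grid.headI.length ≤ row.length) {p : Int × Int} (hp : p ∈ pvS grid) :
    pvGB grid p.1 p.2 =
      ∑ q ∈ pvS grid, (if q ∈ pvImg p ∧ pvV grid q ≠ 0 then pvV grid p else 0) := by
  rw [pv_mem_pvS] at hp
  obtain ⟨h1, h2, h3, h4⟩ := hp
  simp only [pvGB]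
  rw [pv_read hP h1 h2 h3 h4]
  have hmap : (([(0,1),(1,1),(1,0),(1,-1),(-1,-1),(0,-1),(-1,0),(-1,1)] : List (Int × Int)).map
      (fun d => if 0 ≤ p.1 + d.1 ∧ p.1 + d.1 < (grid.length : Int) ∧ 0 ≤ p.2 + d.2 ∧
          p.2 + d.2 < (grid.headI.length : Int) ∧
          PySem.List.pyGetD (PySem.List.pyGetD grid (p.1 + d.1) ([] : List Int)) (p.2 + d.2) 0 ≠ 0
        then (1 : Int) else 0))
      = (([(0,1),(1,1),(1,0),(1,-1),(-1,-1),(0,-1),(-1,0),(-1,1)] : List (Int × Int)).map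
      (fun d => if pvV grid (p.1 + d.1, p.2 + d.2) ≠ 0 then (1 : Int) else 0)) := by
    refine List.map_congr_left (fun d _ => ?_)
    by_cases hb : 0 ≤ p.1 + d.1 ∧ p.1 + d.1 < (grid.length : Int) ∧ 0 ≤ p.2 + d.2 ∧
        p.2 + d.2 < (grid.headI.length : Int)
    · have hre := pv_read hP hb.1 hb.2.1 hb.2.2.1 hb.2.2.2
      by_cases hv : pvV grid (p.1 + d.1, p.2 + d.2) ≠ 0
      · rw [if_pos ⟨hb.1, hb.2.1, hb.2.2.1, hb.2.2.2, by rw [hre]; exact hv⟩, if_pos hv]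
      · rw [if_neg (fun hc => hv (by rw [← hre]; exact hc.2.2.2.2)), if_neg hv]
    · have hv : pvV grid (p.1 + d.1, p.2 + d.2) = 0 := by
        apply pvV_zero_of_not_mem
        rw [pv_mem_pvS]
        exact fun hc => hb ⟨hc.1, hc.2.1, hc.2.2.1, hc.2.2.2⟩
      rw [if_neg (fun hc => hb ⟨hc.1, hc.2.1, hc.2.2.1, hc.2.2.2.1⟩), if_neg (fun hc => hc hv)]
  rw [hmap]
  have hbr : pvV grid (p.1, p.2) *
      (([(0,1),(1,1),(1,0),(1,-1),(-1,-1),(0,-1),(-1,0),(-1,1)] : List (Int × Int)).map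
        (fun d => if pvV grid (p.1 + d.1, p.2 + d.2) ≠ 0 then (1 : Int) else 0)).sum
      = ∑ q ∈ pvS grid, (if q ∈ pvImg p ∧ pvV grid q ≠ 0 then pvV grid p else 0) := by
    rw [← List.sum_toFinset _ pv_nodup_offsets, Finset.mul_sum]
    have h6 : ∑ d ∈ pvDset, pvV grid (p.1, p.2) *
        (if pvV grid (p.1 + d.1, p.2 + d.2) ≠ 0 then (1 : Int) else 0)
        = ∑ d ∈ pvDset,
          (fun q : Int × Int => if pvV grid q ≠ 0 then pvV grid p else 0) (p.1 + d.1, p.2 + d.2) := by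
      refine Finset.sum_congr rfl (fun d _ => ?_)
      by_cases hv : pvV grid (p.1 + d.1, p.2 + d.2) ≠ 0
      · simp only [if_pos hv, mul_one]
      · simp only [if_neg hv, mul_zero]
    refine h6.trans ?_
    refine (pv_sum_pvImg p (fun q => if pvV grid q ≠ 0 then pvV grid p else 0)).trans ?_
    refine (pv_sum_restrict (pvImg p) (fun q => if pvV grid q ≠ 0 then pvV grid p else 0)
      (fun q hq => by show (if pvV grid q ≠ 0 then pvV grid p else 0) = 0; rw [if_neg (fun hc => hc (pvV_zero_of_not_mem hq))])).trans ?_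
    refine Finset.sum_congr rfl (fun q _ => ?_)
    dsimp only
    by_cases hi : q ∈ pvImg p
    · by_cases hv : pvV grid q ≠ 0
      · rw [if_pos hi, if_pos hv, if_pos ⟨hi, hv⟩]
      · rw [if_pos hi, if_neg hv, if_neg (fun hc => hv hc.2)]
    · rw [if_neg hi, if_neg (fun hc => hi hc.1)]
  rw [hbr]

lemma pv_sum_pvS {grid : List (List Int)} (F : Int × Int → Int) :
    ∑ p ∈ pvS grid, F p = ∑ r ∈ pvRn grid.length, ∑ c ∈ pvRn grid.headI.length, F (r, c) :=
  Finset.sum_product _ _ _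

lemma pv_mem_pvS_mk {grid : List (List Int)} {r c : Int}
    (hr : r ∈ pvRn grid.length) (hc : c ∈ pvRn grid.headI.length) : (r, c) ∈ pvS grid :=
  Finset.mem_product.mpr ⟨hr, hc⟩

-- ===== VERDICT (by name: the statement is the Claim_ definition above) =====
set_option maxHeartbeats 1000000 in
theorem calcNeighborScore_spec : Claim_equal_calcNeighborScore := by
  intro grid _ hPre
  obtain ⟨hne, hP⟩ := hPre
  show calcNeighborScore grid = calcNeighborScore_alt grid
  rw [pv_A_sum hne, pv_B_sum hne]
  have hGA : ∑ r ∈ pvRn grid.length, ∑ c ∈ pvRn grid.headI.length, pvGA grid r c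
      = ∑ p ∈ pvS grid, (if pvV grid p ≠ 0 then
          ∑ q ∈ pvS grid, (if q ∈ pvImg p then pvV grid q else 0) else 0) := by
    rw [pv_sum_pvS]
    exact Finset.sum_congr rfl (fun r hr => Finset.sum_congr rfl (fun c hc =>
      pv_GA_eq hne hP (pv_mem_pvS_mk hr hc)))
  have hGB : ∑ r ∈ pvRn grid.length, ∑ c ∈ pvRn grid.headI.length, pvGB grid r c
      = ∑ p ∈ pvS grid, ∑ q ∈ pvS grid,
          (if q ∈ pvImg p ∧ pvV grid q ≠ 0 then pvV grid p else 0) := by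
    rw [pv_sum_pvS]
    exact Finset.sum_congr rfl (fun r hr => Finset.sum_congr rfl (fun c hc =>
      pv_GB_eq hP (pv_mem_pvS_mk hr hc)))
  rw [hGA, hGB]
  have hL : ∀ p ∈ pvS grid,
      (if pvV grid p ≠ 0 then ∑ q ∈ pvS grid, (if q ∈ pvImg p then pvV grid q else 0) else 0)
      = ∑ q ∈ pvS grid, (if pvV grid p ≠ 0 ∧ q ∈ pvImg p then pvV grid q else 0) := by
    intro p _
    by_cases hv : pvV grid p ≠ 0
    · rw [if_pos hv]
      refine Finset.sum_congr rfl (fun q _ => ?_)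
      by_cases hi : q ∈ pvImg p
      · rw [if_pos hi, if_pos ⟨hv, hi⟩]
      · rw [if_neg hi, if_neg (fun hc => hi hc.2)]
    · rw [if_neg hv]
      symm
      exact Finset.sum_eq_zero (fun q _ => if_neg (fun hc => hv hc.1))
  rw [Finset.sum_congr rfl hL]
  conv_rhs => rw [Finset.sum_comm]
  refine Finset.sum_congr rfl (fun p _ => Finset.sum_congr rfl (fun q _ => ?_))
  refine if_congr ?_ rfl rfl
  constructor
  · rintro ⟨hv, hi⟩
    exact ⟨pv_pvImg_symm.mp hi, hv⟩
  · rintro ⟨hi, hv⟩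
    exact ⟨hv, pv_pvImg_symm.mp hi⟩
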